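-- pv_equiv track=rewrite | github.com/Ramin-cs/RezaRepo | ULTIMATE_WORKING_SCANNER.py | check_dom_redirect
-- ===== SOURCE A (Python) =====
-- def check_dom_redirect(content: str, payload: str) -> bool:
--     """Check DOM-based redirect"""
--     dom_patterns = [
--         f'location.href = "{payload}"',
--         f"location.href = '{payload}'",
--         f'window.location = "{payload}"',
--         f"window.location = '{payload}'"
--     ]
--
--     content_lower = content.lower()
--     for pattern in dom_patterns:
--         if pattern.lower() in content_lower:
--             return True
--
--     return False
-- ===== SOURCE B (Python) =====
-- def _match_at(s: str, p: str) -> bool: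
--     """Does a redirect assignment to payload p start exactly at the head of s?"""
--     for prefix in ('location.href = ', 'window.location = '):
--         if s.startswith(prefix):
--             rest = s[len(prefix):]
--             for q in ('"', "'"):
--                 if rest.startswith(q + p + q):
--                     return True
--     return False
--
--
-- def check_dom_redirect(content: str, payload: str) -> bool:
--     """Check DOM-based redirect: single scan over lowered content."""
--     p = payload.lower()
--     s = content.lower()
--     while s:
--         if _match_at(s, p):
--             return True
--         s = s[1:]
--     return False
-- ===== Notes on version B (the rewrite author's own statement) =====
-- stated objective: alternative
-- what changed: B lowercases content and payload once and makes a single left-to-right scan, testing at each position for either assignment prefix followed by a matching quote pair around the payload, instead of A's building four full pattern strings and running four separate substring searches.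
import Mathlib
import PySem

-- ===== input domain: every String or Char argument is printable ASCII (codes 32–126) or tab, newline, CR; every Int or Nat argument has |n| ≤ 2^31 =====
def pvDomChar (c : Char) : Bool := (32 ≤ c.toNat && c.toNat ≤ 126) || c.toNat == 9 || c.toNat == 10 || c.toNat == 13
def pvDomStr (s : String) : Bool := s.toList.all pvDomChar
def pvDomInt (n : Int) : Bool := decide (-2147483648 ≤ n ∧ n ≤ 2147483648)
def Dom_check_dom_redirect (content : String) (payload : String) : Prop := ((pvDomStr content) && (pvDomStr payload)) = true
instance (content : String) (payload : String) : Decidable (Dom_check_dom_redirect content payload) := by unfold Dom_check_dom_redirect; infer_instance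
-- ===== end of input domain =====

-- B replaces A's four built pattern strings and four substring searches with one
-- left-to-right scan of the lowered content, matching prefix + quote pair + lowered
-- payload at each position (objective: alternative, same asymptotic cost).

-- ===== PORT A =====
def check_dom_redirect (content : String) (payload : String) : Bool :=
  let dom_patterns : List String :=
    [ "location.href = \"" ++ payload ++ "\"",
      "location.href = '" ++ payload ++ "'",
      "window.location = \"" ++ payload ++ "\"",
      "window.location = '" ++ payload ++ "'" ]
  let content_lower := PySem.Str.lower content
  dom_patterns.any (fun pattern => PySem.Str.isIn (PySem.Str.lower pattern) content_lower)

-- ===== PORT B =====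
-- helper _match_at from Source B
def pvMatchAt (s : List Char) (p : List Char) : Bool :=
  ["location.href = ".toList, "window.location = ".toList].any fun prefx =>
    PySem.Chars.startswith s prefx &&
      (['"', '\''].any fun q =>
        PySem.Chars.startswith (s.drop prefx.length) (q :: (p ++ [q])))

-- the while loop of Source B: s := s[1:] each round
def pvScan (p : List Char) : List Char → Bool
  | [] => false
  | c :: rest => pvMatchAt (c :: rest) p || pvScan p rest

def check_dom_redirect_alt (content : String) (payload : String) : Bool :=
  pvScan (PySem.Chars.lower payload.toList) (PySem.Chars.lower content.toList)

-- ===== PRECONDITION & SPEC =====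
def Spec_check_dom_redirect (content : String) (payload : String) (out : Bool) : Prop := out = check_dom_redirect_alt content payload
instance (content : String) (payload : String) (out : Bool) : Decidable (Spec_check_dom_redirect content payload out) := by unfold Spec_check_dom_redirect; infer_instance

-- ===== CLAIM (what is proved, stated in full; the proofs are below) =====
def Claim_equal_check_dom_redirect : Prop := ∀ (content : String) (payload : String), Dom_check_dom_redirect content payload → Spec_check_dom_redirect content payload (check_dom_redirect content payload)

-- ===== LEMMAS AND PROOFS =====

theorem append_prefix_iff {α : Type} (a b t : List α) :
    (a ++ b) <+: t ↔ a <+: t ∧ b <+: t.drop a.length := by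
  constructor
  · rintro ⟨r, rfl⟩
    exact ⟨⟨b ++ r, by simp⟩, ⟨r, by simp⟩⟩
  · rintro ⟨⟨r1, rfl⟩, ⟨r, hr⟩⟩
    have h1 : b ++ r = r1 := by simpa using hr
    exact ⟨r, by rw [← h1, List.append_assoc]⟩

theorem pvMatchAt_nil (p : List Char) : pvMatchAt [] p = false := by
  simp [pvMatchAt, PySem.Chars.startswith]

theorem pvScan_iff (p l : List Char) :
    pvScan p l = true ↔ ∃ t, t <:+ l ∧ pvMatchAt t p = true := by
  induction l with
  | nil =>
    simp only [pvScan]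
    constructor
    · intro h; exact absurd h (by simp)
    · rintro ⟨t, ht, hm⟩
      rw [List.suffix_nil.mp ht] at hm
      rw [pvMatchAt_nil] at hm; exact absurd hm (by simp)
  | cons c rest ih =>
    simp only [pvScan, Bool.or_eq_true, ih]
    constructor
    · rintro (h | ⟨t, ht, hm⟩)
      · exact ⟨c :: rest, List.suffix_refl _, h⟩
      · exact ⟨t, ht.trans (List.suffix_cons _ _), hm⟩
    · rintro ⟨t, ht, hm⟩
      rcases List.suffix_cons_iff.mp ht with rfl | ht'
      · exact Or.inl hm
      · exact Or.inr ⟨t, ht', hm⟩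

theorem pvMatchAt_iff (t p : List Char) :
    pvMatchAt t p = true ↔
      ∃ pre ∈ ["location.href = ".toList, "window.location = ".toList],
        ∃ q ∈ ['"', '\''], (pre ++ (q :: (p ++ [q]))) <+: t := by
  simp only [pvMatchAt, List.any_eq_true, Bool.and_eq_true,
    PySem.Chars.startswith_iff, append_prefix_iff]
  constructor
  · rintro ⟨pre, hpre, h1, q, hq, h2⟩; exact ⟨pre, hpre, q, hq, h1, h2⟩
  · rintro ⟨pre, hpre, q, hq, h1, h2⟩; exact ⟨pre, hpre, h1, q, hq, h2⟩

theorem lowered_pattern_1 (payload : String) :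
    PySem.Chars.lower ("location.href = \"" ++ payload ++ "\"").toList
      = "location.href = ".toList ++ ('"' :: (PySem.Chars.lower payload.toList ++ ['"'])) := by
  simp [PySem.Chars.lower, String.toList_append]
  decide

theorem lowered_pattern_2 (payload : String) :
    PySem.Chars.lower ("location.href = '" ++ payload ++ "'").toList
      = "location.href = ".toList ++ ('\'' :: (PySem.Chars.lower payload.toList ++ ['\''])) := by
  simp [PySem.Chars.lower, String.toList_append]
  decide

theorem lowered_pattern_3 (payload : String) :
    PySem.Chars.lower ("window.location = \"" ++ payload ++ "\"").toList
      = "window.location = ".toList ++ ('"' :: (PySem.Chars.lower payload.toList ++ ['"'])) := by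
  simp [PySem.Chars.lower, String.toList_append]
  decide

theorem lowered_pattern_4 (payload : String) :
    PySem.Chars.lower ("window.location = '" ++ payload ++ "'").toList
      = "window.location = ".toList ++ ('\'' :: (PySem.Chars.lower payload.toList ++ ['\''])) := by
  simp [PySem.Chars.lower, String.toList_append]
  decide

-- ===== VERDICT (by name: the statement is the Claim_ definition above) =====
theorem check_dom_redirect_spec : Claim_equal_check_dom_redirect := by
  intro content payload _
  unfold Spec_check_dom_redirect check_dom_redirect check_dom_redirect_alt
  rw [Bool.eq_iff_iff, pvScan_iff]
  simp only [List.any_cons, List.any_nil, Bool.or_false, Bool.or_eq_true,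
    PySem.Str.isIn_iff_infix, PySem.Str.toList_lower, lowered_pattern_1,
    lowered_pattern_2, lowered_pattern_3, lowered_pattern_4]
  constructor
  · rintro (h | h | h | h) <;>
    · rcases List.infix_iff_prefix_suffix.mp h with ⟨t, hp, hs⟩
      refine ⟨t, hs, (pvMatchAt_iff _ _).mpr ?_⟩
      exact ⟨_, by simp, _, by simp, hp⟩
  · rintro ⟨t, hs, hm⟩
    rcases (pvMatchAt_iff _ _).mp hm with ⟨pre, hpre, q, hq, hp⟩
    have hinf : (pre ++ (q :: (PySem.Chars.lower payload.toList ++ [q])))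
        <:+: PySem.Chars.lower content.toList :=
      List.infix_iff_prefix_suffix.mpr ⟨t, hp, hs⟩
    fin_cases hpre <;> fin_cases hq <;> simp_all
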